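-- pv_equiv track=rewrite | github.com/gurujeetkhalsa/aga | clubexpress-mail-app/function_app.py | _build_articles_from_title_links
-- ===== SOURCE A (Python) =====
-- from typing import Iterable, Optional
--
-- def _build_articles_from_title_links(news_lines: list[str], title_links: list[tuple[str, str]]) -> list[dict[str, str]]:
--     articles = []
--     title_indices = _resolve_article_title_indices(news_lines, [title for title, _ in title_links])
--     if not title_indices:
--         return articles
--
--     for idx, ((title, href), title_index) in enumerate(zip(title_links, title_indices)):
--         next_title_index = title_indices[idx + 1] if idx + 1 < len(title_indices) else len(news_lines)
--         body_lines = [line for line in news_lines[title_index:next_title_index] if line]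
--         analysis_lines = [line for line in body_lines if line != title]
--         articles.append(
--             {
--                 "title": title[:500],
--                 "link": href[:1000],
--                 "analysisText": " ".join(analysis_lines).strip(),
--             }
--         )
--     return articles
--
-- def _resolve_article_title_indices(news_lines: list[str], ordered_titles: list[str]) -> list[int]:
--     if not ordered_titles:
--         return []
--
--     sequences: list[list[int]] = []
--     search_start = 0
--     while True:
--         sequence: list[int] = []
--         position = search_start
--         for title in ordered_titles:
--             idx = _find_line_index(news_lines, title, position)
--             if idx is None:
--                 sequence = []
--                 break
--             sequence.append(idx)
--             position = idx + 1
--         if not sequence: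
--             break
--         sequences.append(sequence)
--         search_start = sequence[0] + 1
--
--     if not sequences:
--         return []
--     return sequences[-1]
--
-- def _find_line_index(lines: list[str], target: str, start: int) -> Optional[int]:
--     for idx in range(start, len(lines)):
--         if lines[idx] == target:
--             return idx
--     return None
-- ===== SOURCE B (Python) =====
-- from bisect import bisect_left
--
--
-- def _build_articles_from_title_links(news_lines: list[str], title_links: list[tuple[str, str]]) -> list[dict[str, str]]:
--     titles = [title for title, _ in title_links]
--     if not titles:
--         return []
--
--     # index every line once: line -> sorted list of its positions (one pass instead of rescanning)
--     occ: dict[str, list[int]] = {}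
--     for i, line in enumerate(news_lines):
--         occ.setdefault(line, []).append(i)
--
--     def match_from(start: int):
--         seq = []
--         pos = start
--         for t in titles:
--             lst = occ.get(t, [])
--             k = bisect_left(lst, pos)
--             if k == len(lst):
--                 return None
--             seq.append(lst[k])
--             pos = lst[k] + 1
--         return seq
--
--     # A's while-loop visits successive occurrences of the first title and
--     # keeps the last greedy match before the first failure.
--     best = None
--     for o in occ.get(titles[0], []):
--         seq = match_from(o)
--         if seq is None:
--             break
--         best = seq
--     if best is None:
--         return []
--
--     bounds = best[1:] + [len(news_lines)]
--     return [
--         {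
--             "title": title[:500],
--             "link": href[:1000],
--             "analysisText": " ".join(
--                 ln for ln in news_lines[start:end] if ln and ln != title
--             ).strip(),
--         }
--         for (title, href), start, end in zip(title_links, best, bounds)
--     ]
-- ===== Notes on version B (the rewrite author's own statement) =====
-- stated objective: alternative
-- what changed: B indexes news_lines once into a line->sorted-positions dict and replaces A's repeated linear scans (_find_line_index inside a retrying while-loop) by bisect-based greedy matches launched from each successive occurrence of the first title, then builds articles by zipping the index list with its shifted successor list instead of enumerate-with-lookahead indexing; it trades A's rescanning for a precomputed index (better worst case on repeat-heavy input, larger constant on the common one-round case).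
import Mathlib
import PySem

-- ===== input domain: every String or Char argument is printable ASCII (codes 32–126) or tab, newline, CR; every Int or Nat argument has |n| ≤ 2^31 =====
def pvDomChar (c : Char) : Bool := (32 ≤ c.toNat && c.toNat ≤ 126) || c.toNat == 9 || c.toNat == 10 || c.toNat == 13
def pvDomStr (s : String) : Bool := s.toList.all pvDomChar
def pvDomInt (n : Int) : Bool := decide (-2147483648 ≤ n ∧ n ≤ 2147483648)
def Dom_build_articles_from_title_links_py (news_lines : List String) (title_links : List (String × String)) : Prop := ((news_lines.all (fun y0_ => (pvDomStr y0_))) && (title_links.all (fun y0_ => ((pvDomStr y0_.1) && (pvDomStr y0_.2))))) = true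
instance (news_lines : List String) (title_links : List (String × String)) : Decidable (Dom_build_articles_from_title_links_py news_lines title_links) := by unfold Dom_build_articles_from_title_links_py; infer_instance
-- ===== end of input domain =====

-- B replaces A's retrying linear scans by a one-pass line->positions index with bisect-based
-- greedy matching (objective: alternative algorithm); return values proved equal on all inputs.

-- ===== PORT A =====
-- _find_line_index: for idx in range(start, len(lines)): if lines[idx] == target: return idx
def findAuxA (lines : List String) (target : String) : List Int → Option Int
  | [] => none
  | i :: rest => if PySem.List.pyGet? lines i = some target then some i else findAuxA lines target rest

def findLineIndexA (lines : List String) (target : String) (start : Int) : Option Int :=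
  findAuxA lines target (PySem.List.pyRange start (lines.length : Int) 1)

-- the inner 'for title in ordered_titles' loop of _resolve_article_title_indices
def roundGoA (lines : List String) : List String → List Int → Int → List Int
  | [], seq, _ => seq
  | t :: ts, seq, pos =>
    match findLineIndexA lines t pos with
    | none => []          -- 'sequence = []; break'
    | some idx => roundGoA lines ts (seq ++ [idx]) (idx + 1)

-- the 'while True' loop; fuel (never exhausted) makes the recursion structural
def resolveLoopA (lines : List String) (titles : List String) : Nat → Int → List (List Int) → List (List Int)
  | 0, _, seqs => seqs
  | fuel + 1, searchStart, seqs =>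
    match roundGoA lines titles [] searchStart with
    | [] => seqs
    | s0 :: rest => resolveLoopA lines titles fuel (s0 + 1) (seqs ++ [s0 :: rest])

def resolveIndicesA (lines : List String) (titles : List String) : List Int :=
  match titles with
  | [] => []
  | _ :: _ =>
    match (resolveLoopA lines titles (lines.length + 1) 0 []).getLast? with
    | none => []
    | some s => s

-- the article-building for-loop (enumerate carried as the explicit counter i)
def buildLoopA (news : List String) (idxs : List Int) : List ((String × String) × Int) → Int → List (List (String × String)) → List (List (String × String))
  | [], _, acc => acc
  | ((title, href), ti) :: rest, i, acc =>
    let nexti : Int := if i + 1 < (idxs.length : Int) then (PySem.List.pyGet? idxs (i + 1)).getD 0 else (news.length : Int)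
    let body := (PySem.List.slice news (some ti) (some nexti)).filter (fun ln => ln != "")
    let analysis := body.filter (fun ln => ln != title)
    buildLoopA news idxs rest (i + 1)
      (acc ++ [[("title", PySem.Str.slice title none (some 500)),
                ("link", PySem.Str.slice href none (some 1000)),
                ("analysisText", PySem.Str.strip (PySem.Str.join " " analysis))]])

def build_articles_from_title_links_py (news_lines : List String) (title_links : List (String × String)) : List (List (String × String)) :=
  let title_indices := resolveIndicesA news_lines (title_links.map (·.1))
  if title_indices = [] then []
  else buildLoopA news_lines title_indices (List.zip title_links title_indices) 0 []

-- ===== PORT B =====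
-- occ: line -> list of its positions, built in one pass (occ.setdefault(line, []).append(i))
def occDictB (news : List String) : PySem.Dict String (List Int) :=
  (PySem.List.enumerate news 0).foldl (fun d p => d.modify p.2 [] (fun l => l ++ [p.1])) PySem.Dict.empty

-- lst = occ.get(t, []); k = bisect_left(lst, pos); None if k == len(lst) else lst[k]
def bisectStepB (lst : List Int) (pos : Int) : Option Int :=
  let k := PySem.List.bisectLeft lst pos
  if k = lst.length then none else lst[k]?

def matchFromGoB (occ : PySem.Dict String (List Int)) : List String → List Int → Int → Option (List Int)
  | [], seq, _ => some seq
  | t :: ts, seq, pos =>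
    match bisectStepB (occ.getD t []) pos with
    | none => none
    | some v => matchFromGoB occ ts (seq ++ [v]) (v + 1)

def bestLoopB (occ : PySem.Dict String (List Int)) (titles : List String) : List Int → Option (List Int) → Option (List Int)
  | [], best => best
  | o :: os, best =>
    match matchFromGoB occ titles [] o with
    | none => best
    | some seq => bestLoopB occ titles os (some seq)

def mkArticleB (news : List String) (title href : String) (s e : Int) : List (String × String) :=
  let body := (PySem.List.slice news (some s) (some e)).filter (fun ln => ln != "" && ln != title)
  [("title", PySem.Str.slice title none (some 500)),
   ("link", PySem.Str.slice href none (some 1000)),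
   ("analysisText", PySem.Str.strip (PySem.Str.join " " body))]

def build_articles_from_title_links_py_alt (news_lines : List String) (title_links : List (String × String)) : List (List (String × String)) :=
  match title_links.map (·.1) with
  | [] => []
  | t0 :: _ =>
    let titles := title_links.map (·.1)
    let occ := occDictB news_lines
    match bestLoopB occ titles (occ.getD t0 []) none with
    | none => []
    | some best =>
      let bounds := PySem.List.slice best (some 1) none ++ [(news_lines.length : Int)]
      (List.zip title_links (List.zip best bounds)).map
        (fun q => mkArticleB news_lines q.1.1 q.1.2 q.2.1 q.2.2)

-- ===== PRECONDITION & SPEC =====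
def Spec_build_articles_from_title_links_py (news_lines : List String) (title_links : List (String × String)) (out : List (List (String × String))) : Prop := out = build_articles_from_title_links_py_alt news_lines title_links
instance (news_lines : List String) (title_links : List (String × String)) (out : List (List (String × String))) : Decidable (Spec_build_articles_from_title_links_py news_lines title_links out) := by unfold Spec_build_articles_from_title_links_py; infer_instance

-- ===== CLAIM (what is proved, stated in full; the proofs are below) =====
def Claim_equal_build_articles_from_title_links_py : Prop := ∀ (news_lines : List String) (title_links : List (String × String)), Dom_build_articles_from_title_links_py news_lines title_links → Spec_build_articles_from_title_links_py news_lines title_links (build_articles_from_title_links_py news_lines title_links)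

-- ===== LEMMAS AND PROOFS =====
def occList (news : List String) (t : String) : List Int :=
  ((PySem.List.enumerate news 0).filter (fun p => p.2 == t)).map (·.1)

def occL (t : String) : List String → Int → List Int :=
  fun ls b => ((PySem.List.enumerate ls b).filter (fun p => p.2 == t)).map (·.1)

theorem occL_bounds (t : String) (ls : List String) (b : Int) :
    ∀ x ∈ occL t ls b, b ≤ x ∧ x < b + (ls.length : Int) := by
  intro x hx
  simp only [occL, List.mem_map, List.mem_filter] at hx
  obtain ⟨p, ⟨hp, -⟩, rfl⟩ := hx
  rw [PySem.List.mem_enumerate_iff] at hp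
  obtain ⟨k, hk, rfl⟩ := hp
  constructor <;> simp <;> omega

theorem occDictB_getD (news : List String) (t : String) :
    (occDictB news).getD t [] = occList news t := by
  have h : occDictB news
      = ((PySem.List.enumerate news 0).map (fun p => (p.2, p.1))).foldl
          (fun d p => d.modify p.1 [] (fun l => l ++ [p.2])) PySem.Dict.empty := by
    rw [List.foldl_map]
    rfl
  rw [h, PySem.Dict.getD_foldl_modify_append, PySem.Dict.getD_empty]
  simp [occList, List.filter_map, List.map_map, Function.comp_def]

theorem occList_sorted (news : List String) (t : String) : (occList news t).Pairwise (· < ·) := by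
  simp only [occList, List.pairwise_map]
  exact (PySem.List.pairwise_lt_enumerate news 0).filter _

theorem occList_bounds (news : List String) (t : String) :
    ∀ x ∈ occList news t, 0 ≤ x ∧ x < (news.length : Int) := by
  intro x hx
  have := occL_bounds t news 0 x hx
  omega

theorem bisectStepB_eq_filter_head (lst : List Int) (pos : Int) (h : lst.Pairwise (· < ·)) :
    bisectStepB lst pos = (lst.filter (fun x => pos ≤ x)).head? := by
  obtain ⟨hle, hlt, hge⟩ := PySem.List.bisectLeft_spec lst pos (h.imp (fun hab => le_of_lt hab))
  set k := PySem.List.bisectLeft lst pos with hk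
  unfold bisectStepB
  rw [← hk]
  by_cases hkl : k = lst.length
  · rw [if_pos hkl]
    symm
    rw [List.head?_eq_none_iff, List.filter_eq_nil_iff]
    intro x hx
    obtain ⟨j, hj, rfl⟩ := List.mem_iff_getElem.mp hx
    have := hlt j hj (by omega)
    simpa using by omega
  · have hklt : k < lst.length := lt_of_le_of_ne hle hkl
    rw [if_neg hkl]
    have hsplit : lst = lst.take k ++ lst[k] :: lst.drop (k + 1) := by
      rw [← List.drop_eq_getElem_cons hklt, List.take_append_drop]
    rw [List.getElem?_eq_getElem hklt]
    conv_rhs => rw [hsplit]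
    rw [List.filter_append]
    have htake : (lst.take k).filter (fun x => decide (pos ≤ x)) = [] := by
      rw [List.filter_eq_nil_iff]
      intro x hx
      obtain ⟨j, hj, rfl⟩ := List.mem_iff_getElem.mp hx
      have hjk : j < k := by simp at hj; omega
      have hjl : j < lst.length := by omega
      rw [List.getElem_take]
      have := hlt j hjl hjk
      simpa using by omega
    rw [htake, List.nil_append, List.filter_cons]
    have : pos ≤ lst[k] := hge k hklt le_rfl
    simp [this]

-- proof-side reference scan: first index ≥ b whose line equals t, scanning a suffix
def scanF (t : String) : List String → Int → Option Int
  | [], _ => none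
  | x :: ls, b => if x = t then some b else scanF t ls (b + 1)

theorem pyRange_nil_of_le {a b : Int} (h : b ≤ a) : PySem.List.pyRange a b = [] := by
  rw [PySem.List.pyRange_one]
  have : (b - a).toNat = 0 := by omega
  simp [this]

theorem findAuxA_eq_scanF (news : List String) (t : String) :
    ∀ (n : Nat) (s : Int), 0 ≤ s → (news.length : Int) ≤ s + n →
    findAuxA news t (PySem.List.pyRange s (news.length : Int)) = scanF t (news.drop s.toNat) s := by
  intro n
  induction n with
  | zero =>
    intro s hs hn
    rw [pyRange_nil_of_le (by omega)]
    have : news.drop s.toNat = [] := List.drop_eq_nil_of_le (by omega)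
    simp [this, findAuxA, scanF]
  | succ n ih =>
    intro s hs hn
    by_cases hlt : s < (news.length : Int)
    · have hsl : s.toNat < news.length := by omega
      rw [PySem.List.pyRange_one_cons hlt]
      rw [List.drop_eq_getElem_cons hsl]
      simp only [findAuxA, scanF]
      have hget : PySem.List.pyGet? news s = some news[s.toNat] := by
        rw [PySem.List.pyGet?_of_nonneg news hs, List.getElem?_eq_getElem hsl]
      rw [hget]
      have harg : s.toNat + 1 = (s + 1).toNat := by omega
      by_cases hx : news[s.toNat] = t
      · simp [hx]
      · have h1 : ¬ (some news[s.toNat] = some t) := by simpa using hx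
        rw [if_neg h1, if_neg hx, harg]
        exact ih (s + 1) (by omega) (by omega)
    · rw [pyRange_nil_of_le (by omega)]
      have : news.drop s.toNat = [] := List.drop_eq_nil_of_le (by omega)
      simp [this, findAuxA, scanF]

theorem scanF_eq_head (t : String) :
    ∀ (ls : List String) (b : Int), scanF t ls b = (occL t ls b).head? := by
  intro ls
  induction ls with
  | nil => intro b; simp [scanF, occL, PySem.List.enumerate_nil]
  | cons x ls ih =>
    intro b
    simp only [scanF, occL, PySem.List.enumerate_cons, List.filter_cons]
    by_cases hx : x = t
    · simp [hx]
    · have : ((b, x).2 == t) = false := by simpa using hx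
      rw [this, if_neg hx]
      simpa [occL] using ih (b + 1)

theorem occL_filter_drop (t : String) :
    ∀ (ls : List String) (b s : Int), 0 ≤ b → b ≤ s →
    (occL t ls b).filter (fun x => s ≤ x) = occL t (ls.drop (s - b).toNat) s := by
  intro ls
  induction ls with
  | nil => intro b s _ _; simp [occL, PySem.List.enumerate_nil]
  | cons x ls ih =>
    intro b s hb hbs
    by_cases hbs' : b = s
    · subst hbs'
      have h0 : (b - b).toNat = 0 := by omega
      rw [h0, List.drop_zero, List.filter_eq_self.mpr]
      intro a ha
      have := occL_bounds t (x :: ls) b a ha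
      simpa using by omega
    · have hlt : b < s := by omega
      have hstep : occL t (x :: ls) b
          = (if x == t then [b] else []) ++ occL t ls (b + 1) := by
        simp only [occL, PySem.List.enumerate_cons, List.filter_cons]
        by_cases hx : x = t <;> simp [hx]
      rw [hstep, List.filter_append]
      have h1 : ((if x == t then [b] else []).filter (fun x => s ≤ x)) = [] := by
        by_cases hx : x == t <;> simp [hx] <;> omega
      rw [h1, List.nil_append, ih (b + 1) s (by omega) (by omega)]
      have : (s - b).toNat = (s - (b + 1)).toNat + 1 := by omega
      rw [this, List.drop_succ_cons]

theorem findLineIndexA_eq_filter_head' (news : List String) (t : String) (s : Int) (hs : 0 ≤ s) :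
    findLineIndexA news t s = ((occList news t).filter (fun x => s ≤ x)).head? := by
  unfold findLineIndexA
  rw [findAuxA_eq_scanF news t news.length s hs (by omega), scanF_eq_head]
  have : occList news t = occL t news 0 := rfl
  rw [this, occL_filter_drop t news 0 s le_rfl hs]
  simp

theorem roundGoA_eq_matchFromGoB' (news : List String) :
    ∀ (ts : List String) (seq : List Int) (pos : Int), 0 ≤ pos →
    roundGoA news ts seq pos = (matchFromGoB (occDictB news) ts seq pos).getD [] := by
  intro ts
  induction ts with
  | nil => intro seq pos _; simp [roundGoA, matchFromGoB]
  | cons t ts ih =>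
    intro seq pos hp
    simp only [roundGoA, matchFromGoB, occDictB_getD,
      bisectStepB_eq_filter_head _ pos (occList_sorted news t),
      findLineIndexA_eq_filter_head' news t pos hp]
    cases hh : ((occList news t).filter (fun x => pos ≤ x)).head? with
    | none => simp
    | some v =>
      have hv : pos ≤ v := by
        have := List.mem_filter.mp (List.mem_of_mem_head? hh)
        simpa using this.2
      exact ih (seq ++ [v]) (v + 1) (by omega)

theorem matchFromGoB_acc' (occ : PySem.Dict String (List Int)) :
    ∀ (ts : List String) (seq out : List Int) (pos : Int),
    matchFromGoB occ ts seq pos = some out → ∃ tl, out = seq ++ tl ∧ out.length = seq.length + ts.length := by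
  intro ts
  induction ts with
  | nil =>
    intro seq out pos h
    simp only [matchFromGoB, Option.some_inj] at h
    exact ⟨[], by simp [← h]⟩
  | cons t ts ih =>
    intro seq out pos h
    simp only [matchFromGoB] at h
    cases hb : bisectStepB (occ.getD t []) pos with
    | none => rw [hb] at h; exact absurd h (by simp)
    | some v =>
      rw [hb] at h
      obtain ⟨tl, htl, hlen⟩ := ih (seq ++ [v]) out (v + 1) h
      exact ⟨v :: tl, by simpa using htl, by simp at hlen ⊢; omega⟩

theorem resolveLoopA_eq_bestLoopB' (news : List String) (t0 : String) (ts : List String) :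
    ∀ (os : List Int) (fuel : Nat) (s : Int) (seqs : List (List Int)),
    0 ≤ s → os = (occList news t0).filter (fun x => s ≤ x) → os.length < fuel →
    (resolveLoopA news (t0 :: ts) fuel s seqs).getLast?
      = bestLoopB (occDictB news) (t0 :: ts) os seqs.getLast? := by
  intro os
  induction os with
  | nil =>
    intro fuel s seqs hs hos hfuel
    cases fuel with
    | zero => omega
    | succ f =>
      have hfind : findLineIndexA news t0 s = none := by
        rw [findLineIndexA_eq_filter_head' news t0 s hs, ← hos]
        rfl
      simp only [resolveLoopA, roundGoA, hfind, bestLoopB]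
  | cons o os' ih =>
    intro fuel s seqs hs hos hfuel
    cases fuel with
    | zero => omega
    | succ f =>
      obtain ⟨l₁, l₂, hsplit, hl₁, hso, hl₂⟩ := List.filter_eq_cons_iff.mp hos.symm
      have hsorted := occList_sorted news t0
      rw [hsplit] at hsorted
      have hgt : ∀ x ∈ l₂, o < x := by
        have := (List.pairwise_append.mp hsorted).2.1
        exact fun x hx => (List.pairwise_cons.mp this).1 x hx
      have hso' : s ≤ o := by simpa using hso
      have ho0 : 0 ≤ o := by
        have : o ∈ occList news t0 := by rw [hsplit]; simp
        exact (occList_bounds news t0 o this).1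
      have hl₁' : ∀ x ∈ l₁, ¬ (s ≤ x) := by
        intro x hx
        have := hl₁ x hx
        simpa using this
      -- the three filter computations
      have f1 : (occList news t0).filter (fun x => o ≤ x) = o :: l₂ := by
        rw [hsplit, List.filter_append, List.filter_cons]
        have h1 : l₁.filter (fun x => decide (o ≤ x)) = [] := by
          rw [List.filter_eq_nil_iff]; intro x hx
          have := hl₁' x hx; simpa using by omega
        have h2 : l₂.filter (fun x => decide (o ≤ x)) = l₂ := by
          rw [List.filter_eq_self]; intro x hx
          have := hgt x hx; simpa using by omega
        simp [h1, h2]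
      have f2 : os' = l₂ := by
        rw [← hl₂]
        exact List.filter_eq_self.mpr (fun x hx => by have := hgt x hx; simpa using by omega)
      have f3 : (occList news t0).filter (fun x => o + 1 ≤ x) = os' := by
        rw [hsplit, List.filter_append, List.filter_cons]
        have h1 : l₁.filter (fun x => decide (o + 1 ≤ x)) = [] := by
          rw [List.filter_eq_nil_iff]; intro x hx
          have := hl₁' x hx; simpa using by omega
        have h2 : l₂.filter (fun x => decide (o + 1 ≤ x)) = l₂ := by
          rw [List.filter_eq_self]; intro x hx
          have := hgt x hx; simpa using by omega
        rw [h1, h2]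
        have hoo : (decide (o + 1 ≤ o)) = false := by simp
        rw [hoo]
        simp [f2]
      -- A's round from s and B's match from o continue identically after the first step
      have hfind : findLineIndexA news t0 s = some o := by
        rw [findLineIndexA_eq_filter_head' news t0 s hs, ← hos]; rfl
      have hbis : bisectStepB ((occDictB news).getD t0 []) o = some o := by
        rw [occDictB_getD, bisectStepB_eq_filter_head _ o (occList_sorted news t0), f1]; rfl
      have hA : roundGoA news (t0 :: ts) [] s
          = (matchFromGoB (occDictB news) ts [o] (o + 1)).getD [] := by
        simp only [roundGoA, hfind, List.nil_append]
        exact roundGoA_eq_matchFromGoB' news ts [o] (o + 1) (by omega)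
      have hB : matchFromGoB (occDictB news) (t0 :: ts) [] o
          = matchFromGoB (occDictB news) ts [o] (o + 1) := by
        simp only [matchFromGoB, hbis, List.nil_append]
      cases hr : matchFromGoB (occDictB news) ts [o] (o + 1) with
      | none =>
        have hround : roundGoA news (t0 :: ts) [] s = [] := by rw [hA, hr]; rfl
        simp only [resolveLoopA, hround, bestLoopB, hB, hr]
      | some seq =>
        obtain ⟨tl, htl, -⟩ := matchFromGoB_acc' (occDictB news) ts [o] seq (o + 1) hr
        have hround : roundGoA news (t0 :: ts) [] s = o :: tl := by
          rw [hA, hr]; simpa using htl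
        simp only [resolveLoopA, hround, bestLoopB, hB, hr]
        rw [ih f (o + 1) (seqs ++ [o :: tl]) (by omega) f3.symm (by simpa using hfuel)]
        rw [htl]
        simp

theorem article_eq (news : List String) (t h : String) (a b : Int) :
    [("title", PySem.Str.slice t none (some 500)), ("link", PySem.Str.slice h none (some 1000)),
     ("analysisText", PySem.Str.strip (PySem.Str.join " "
       (List.filter (fun ln => ln != t)
         (List.filter (fun ln => ln != "") (PySem.List.slice news (some a) (some b))))))]
    = mkArticleB news t h a b := by
  simp only [mkArticleB, List.filter_filter]
  have hf : (PySem.List.slice news (some a) (some b)).filter (fun ln => (ln != "") && (ln != t))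
      = (PySem.List.slice news (some a) (some b)).filter (fun ln => (ln != t) && (ln != "")) :=
    List.filter_congr (fun x _ => Bool.and_comm _ _)
  rw [hf]

theorem buildLoopA_eq_mapB' (news : List String) (idxs : List Int) :
    ∀ (tl : List (String × String)) (rest : List Int) (i : Nat) (acc : List (List (String × String))),
    idxs.drop i = rest → tl.length = rest.length →
    buildLoopA news idxs (List.zip tl rest) (i : Int) acc
      = acc ++ (List.zip tl (List.zip rest (rest.drop 1 ++ [(news.length : Int)]))).map
          (fun q => mkArticleB news q.1.1 q.1.2 q.2.1 q.2.2) := by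
  intro tl
  induction tl with
  | nil => intro rest i acc _ _; simp [buildLoopA]
  | cons p tl' ih =>
    intro rest i acc hdrop hlen
    obtain ⟨t, h⟩ := p
    cases rest with
    | nil => simp at hlen
    | cons r0 rest' =>
      have hi : i < idxs.length := by
        by_contra hcon
        rw [List.drop_eq_nil_of_le (by omega)] at hdrop
        exact List.cons_ne_nil _ _ hdrop.symm
      have hdrop' : idxs.drop (i + 1) = rest' := by
        rw [← List.drop_drop]  -- drop 1 (drop i)
        rw [hdrop]
        rfl
      have hget : PySem.List.pyGet? idxs ((i : Int) + 1) = rest'.head? := by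
        have : ((i : Int) + 1) = ((i + 1 : Nat) : Int) := by push_cast; ring
        rw [this, PySem.List.pyGet?_natCast, ← hdrop', List.head?_drop]
      have hlenrest : rest'.length = idxs.length - (i + 1) := by
        rw [← hdrop', List.length_drop]
      have hcond : ((i : Int) + 1 < (idxs.length : Int)) ↔ rest' ≠ [] := by
        rw [← List.length_pos_iff]
        omega
      simp only [List.zip_cons_cons, buildLoopA]
      cases rest' with
      | nil =>
        have hc : ¬ ((i : Int) + 1 < (idxs.length : Int)) := by
          simp only [hcond]; simp
        rw [if_neg hc]
        have htl' : tl' = [] := by simpa using hlen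
        subst htl'
        simp only [List.zip_nil_left, buildLoopA, List.drop_succ_cons, List.drop_zero,
          List.nil_append, List.zip_cons_cons, List.map]
        rw [article_eq news t h r0 (news.length : Int)]
      | cons r1 rest'' =>
        have hc : ((i : Int) + 1 < (idxs.length : Int)) := by
          rw [hcond]; exact List.cons_ne_nil _ _
        rw [if_pos hc, hget]
        have hr : ((r1 :: rest'').head?.getD 0) = r1 := rfl
        rw [hr, article_eq news t h r0 r1]
        have hcast : ((i : Int) + 1) = ((i + 1 : Nat) : Int) := by push_cast; ring
        rw [hcast, ih (r1 :: rest'') (i + 1) (acc ++ [mkArticleB news t h r0 r1]) hdrop' (by simpa using hlen)]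
        simp [List.zip_cons_cons, List.append_assoc]

theorem bestLoopB_some_length (occ : PySem.Dict String (List Int)) (titles : List String) :
    ∀ (os : List Int) (b : Option (List Int)) (best : List Int),
    bestLoopB occ titles os b = some best →
    (∀ x, b = some x → x.length = titles.length) → best.length = titles.length := by
  intro os
  induction os with
  | nil =>
    intro b best h hb
    exact hb best h
  | cons o os' ih =>
    intro b best h hb
    simp only [bestLoopB] at h
    cases hm : matchFromGoB occ titles [] o with
    | none => rw [hm] at h; exact hb best h
    | some seq =>
      rw [hm] at h
      refine ih (some seq) best h ?_
      intro x hx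
      obtain ⟨tl, htl, hlen⟩ := matchFromGoB_acc' occ titles [] seq o hm
      simp only [Option.some_inj] at hx
      subst hx; simpa using hlen

theorem occList_length_le (news : List String) (t : String) :
    (occList news t).length ≤ news.length := by
  have h1 : (occList news t).length ≤ (PySem.List.enumerate news 0).length := by
    simp only [occList, List.length_map]
    exact List.length_filter_le _ _
  have h2 : (PySem.List.enumerate news 0).length = news.length := PySem.List.length_enumerate _ _
  omega

theorem main_eq (news : List String) (tl : List (String × String)) :
    build_articles_from_title_links_py news tl = build_articles_from_title_links_py_alt news tl := by
  unfold build_articles_from_title_links_py build_articles_from_title_links_py_alt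
  cases hT : tl.map (·.1) with
  | nil =>
    simp [resolveIndicesA]
  | cons t0 ts =>
    have hfilter0 : (occList news t0).filter (fun x => (0:Int) ≤ x) = occList news t0 :=
      List.filter_eq_self.mpr (fun x hx => by
        have := (occList_bounds news t0 x hx).1; simpa using this)
    have hocc := occList_length_le news t0
    have hloop := resolveLoopA_eq_bestLoopB' news t0 ts (occList news t0) (news.length + 1) 0 []
      le_rfl hfilter0.symm (by omega)
    simp only [List.getLast?_nil] at hloop
    cases hbest : bestLoopB (occDictB news) (t0 :: ts) (occList news t0) none with
    | none =>
      simp only [resolveIndicesA, occDictB_getD, hloop, hbest]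
      simp
    | some best =>
      have hblen : best.length = ts.length + 1 := by
        simpa using bestLoopB_some_length (occDictB news) (t0 :: ts) (occList news t0) none best hbest
          (by intro x hx; cases hx)
      have hbne : best ≠ [] := by
        intro hcon; rw [hcon] at hblen; simp at hblen
      simp only [resolveIndicesA, occDictB_getD, hloop, hbest]
      rw [if_neg hbne]
      have hcast0 : (0 : Int) = ((0 : Nat) : Int) := rfl
      have htlen : tl.length = best.length := by
        have : tl.length = (tl.map (·.1)).length := by simp
        rw [this, hT]; simpa using hblen.symm
      rw [hcast0, buildLoopA_eq_mapB' news best tl best 0 [] (by simp) htlen]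
      rw [PySem.List.slice_from_one, List.nil_append, ← List.drop_one]


-- ===== VERDICT (by name: the statement is the Claim_ definition above) =====
theorem build_articles_from_title_links_py_spec : Claim_equal_build_articles_from_title_links_py := by
  intro news_lines title_links _
  unfold Spec_build_articles_from_title_links_py
  exact main_eq news_lines title_links
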